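-- pv_equiv track=rewrite | github.com/Liujia127/PLC-Transition-Sequence | string_division/all/main_algorithm/frequent_items.py | find_sorted_substrings
-- ===== SOURCE A (Python) =====
-- class TrieNode:
--     def __init__(self):
--         self.children = {}
--         self.freq = 0
--
-- def insert_into_trie(root, string):
--     node = root
--     for char in string:
--         if char not in node.children:
--             node.children[char] = TrieNode()
--         node = node.children[char]
--         node.freq += 1
--
-- def find_sorted_substrings(string):
--     root = TrieNode()
--     n = len(string)
--
--     # 从后缀数组中逆序遍历后缀并插入到 Trie 树中
--     for i in range(n - 1, -1, -1):
--         suffix = string[i:]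
--         if len(suffix) > 1:  # 仅考虑长度大于1的后缀
--             insert_into_trie(root, suffix)
--
--     # 使用迭代方式遍历 Trie 树以获取所有出现频率大于等于2的子串
--     def find_substring_frequent(node, prefix):
--         result = []
--         stack = [(node, prefix)]
--         while stack:
--             current_node, current_prefix = stack.pop()
--             if len(current_prefix) > 0 and current_node.freq >= 2:
--                 result.append((current_prefix, current_node.freq))
--             for char, child in current_node.children.items():
--                 stack.append((child, current_prefix + char))
--         return result
--
--     substring_frequent = find_substring_frequent(root, "")
--
--     # 按频率排序
--     substring_frequent.sort(key=lambda x: x[1], reverse=True)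
--
--     # 删除被其他子串包含且频率相同的较短子串
--     final_result = []
--     for substring, freq in substring_frequent:
--         is_contained = False
--         for other_substring, other_freq in substring_frequent:
--             if substring != other_substring and substring in other_substring and freq == other_freq:
--                 is_contained = True
--                 break
--         if not is_contained:
--             final_result.append((substring, freq))
--
--     return final_result
-- ===== SOURCE B (Python) =====
-- def find_sorted_substrings(string):
--     n = len(string)
--
--     # Top-down refinement of occurrence lists: a branch is (prefix, list of
--     # start positions of prefix).  Suffix starts are taken right-to-left and
--     # each branch's output block is accumulated back-to-front, so no trie is
--     # ever materialised.
--     def grow(prefix, starts):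
--         block = []
--         if prefix and len(starts) > 1:
--             block.append((prefix, len(starts)))
--         d = len(prefix)
--         groups = {}
--         for i in starts:
--             if i + d < n:
--                 groups.setdefault(string[i + d], []).append(i)
--         rest = []
--         for ch, g in groups.items():
--             rest = grow(prefix + ch, g) + rest
--         return block + rest
--
--     items = grow("", list(reversed(range(n - 1))))
--     items.sort(key=lambda item: item[1], reverse=True)
--
--     # keep only substrings not contained in another substring of equal frequency
--     by_freq = {}
--     for s, f in items:
--         by_freq.setdefault(f, []).append(s)
--     return [(s, f) for s, f in items
--             if not any(s != t and s in t for t in by_freq[f])]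
-- ===== Notes on version B (the rewrite author's own statement) =====
-- stated objective: alternative
-- what changed: B never builds a trie: it refines occurrence-position lists top-down (grouping starts by the next character and recursing, accumulating each branch's block back-to-front), and replaces A's O(m^2) all-pairs same-frequency containment scan by a frequency-indexed grouping so each substring is only checked against substrings of its own frequency.
import Mathlib
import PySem

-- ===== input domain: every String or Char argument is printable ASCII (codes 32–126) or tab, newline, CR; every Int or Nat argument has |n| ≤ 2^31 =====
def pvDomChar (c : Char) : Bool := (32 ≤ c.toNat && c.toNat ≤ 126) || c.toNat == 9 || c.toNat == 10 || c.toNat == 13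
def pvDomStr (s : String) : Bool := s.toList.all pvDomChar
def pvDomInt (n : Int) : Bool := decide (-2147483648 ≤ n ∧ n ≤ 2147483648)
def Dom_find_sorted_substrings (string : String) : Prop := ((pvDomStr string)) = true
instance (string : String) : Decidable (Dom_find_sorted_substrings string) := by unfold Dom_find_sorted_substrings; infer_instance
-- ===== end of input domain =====

-- B replaces A's suffix trie + explicit-stack walk + all-pairs same-frequency containment scan by a
-- top-down refinement of occurrence-position lists (no trie is built; branch blocks are accumulated
-- back-to-front) and a frequency-indexed containment filter (objective: alternative).

-- ===== PORT A =====
-- TrieNode's children dict is encoded first-child/next-sibling: a `CTrie` IS an ordered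
-- association list  char ↦ (freq, children)  (no nested inductive; exact same data).
inductive CTrie where
  | nil : CTrie
  | cons : Char → Int → CTrie → CTrie → CTrie
deriving DecidableEq, Repr

-- insert_into_trie: walk the chars; create a missing child at the END of the sibling list
-- (dict insertion order), step into it and increment its freq.
def insertCL : CTrie → List Char → CTrie
  | t, [] => t
  | .nil, c :: cs => .cons c 1 (insertCL .nil cs) .nil
  | .cons c' f ch rest, c :: cs =>
      if c' = c then .cons c' (f + 1) (insertCL ch cs) rest
      else .cons c' f ch (insertCL rest (c :: cs))
  termination_by t cs => (cs.length, sizeOf t)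

def sizeT : CTrie → Nat
  | .nil => 1
  | .cons _ _ ch rest => 1 + sizeT ch + sizeT rest

-- the (node, prefix) pairs pushed for the children of a node, in dict order
def childEntries : CTrie → List Char → List (Int × CTrie × List Char)
  | .nil, _ => []
  | .cons c f ch rest, p => (f, ch, p ++ [c]) :: childEntries rest p

def stackSize (st : List (Int × CTrie × List Char)) : Nat :=
  (st.map (fun e => sizeT e.2.1 + 1)).sum

theorem childEntries_size (ch : CTrie) (p : List Char) :
    stackSize (childEntries ch p) + 1 = sizeT ch := by
  induction ch generalizing p with
  | nil => simp [childEntries, stackSize, sizeT]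
  | cons c f ch rest ihc ihr =>
      simp only [childEntries, stackSize, List.map_cons, List.sum_cons, sizeT]
      have := ihr p
      simp only [stackSize] at this
      omega

theorem stackSize_append (xs ys : List (Int × CTrie × List Char)) :
    stackSize (xs ++ ys) = stackSize xs + stackSize ys := by
  simp [stackSize]

theorem stackSize_reverse (xs : List (Int × CTrie × List Char)) :
    stackSize xs.reverse = stackSize xs := by
  simp [stackSize]

theorem stackSize_cons (e : Int × CTrie × List Char) (rest : List (Int × CTrie × List Char)) :
    stackSize (e :: rest) = sizeT e.2.1 + 1 + stackSize rest := by
  simp [stackSize]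

-- find_substring_frequent's while-loop; the Python stack's top is the head here.
def dfsStack : List (Int × CTrie × List Char) → List (List Char × Int)
  | [] => []
  | (f, ch, p) :: rest =>
      (if p.length > 0 ∧ f ≥ 2 then [(p, f)] else [])
      ++ dfsStack ((childEntries ch p).reverse ++ rest)
  termination_by st => stackSize st
  decreasing_by
    have h := childEntries_size ch p
    rw [stackSize_append, stackSize_reverse, stackSize_cons]
    dsimp only
    omega

def find_sorted_substrings (string : String) : List (String × Int) :=
  let cs := string.toList
  let n : Int := cs.length
  let root := (PySem.List.pyRange (n - 1) (-1) (-1)).foldl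
      (fun t i =>
        let suffix := PySem.List.slice cs (some i) none
        if suffix.length > 1 then insertCL t suffix else t) .nil
  let substring_frequent := dfsStack [(0, root, ([] : List Char))]
  let sortedL := PySem.List.sorted substring_frequent (fun x => x.2) true
  let final := sortedL.foldl
      (fun acc sf =>
        if sortedL.any (fun og =>
            decide (sf.1 ≠ og.1) && PySem.Chars.isIn sf.1 og.1 && decide (sf.2 = og.2)) then acc
        else acc ++ [sf]) []
  final.map (fun p => (String.ofList p.1, p.2))

-- ===== PORT B =====
-- grow: a branch is (prefix, list of start positions of prefix); `fuel` is a totality guard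
-- only — every actual call is made with more fuel than the recursion depth n.
def growB (cs : List Char) (n : Nat) : Nat → List Char → List Nat → List (List Char × Int)
  | 0, pre, starts =>
      if pre ≠ [] ∧ 1 < starts.length then [(pre, (starts.length : Int))] else []
  | fuel + 1, pre, starts =>
      let block := if pre ≠ [] ∧ 1 < starts.length then [(pre, (starts.length : Int))] else []
      let d := pre.length
      let groups := starts.foldl
          (fun (g : PySem.Dict Char (List Nat)) i =>
            if i + d < n then g.modify (cs.getD (i + d) 'a') [] (fun v => v ++ [i]) else g)
          PySem.Dict.empty
      let rest := groups.items.foldl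
          (fun rest kv => growB cs n fuel (pre ++ [kv.1]) kv.2 ++ rest) []
      block ++ rest

def find_sorted_substrings_alt (string : String) : List (String × Int) :=
  let cs := string.toList
  let n := cs.length
  let items := growB cs n (n + 1) [] (List.range (n - 1)).reverse
  let sortedL := PySem.List.sorted items (fun x => x.2) true
  let byFreq := sortedL.foldl
      (fun (d : PySem.Dict Int (List (List Char))) sf => d.modify sf.2 [] (fun v => v ++ [sf.1]))
      PySem.Dict.empty
  (sortedL.filter (fun sf =>
      !((byFreq.getD sf.2 []).any (fun t => decide (sf.1 ≠ t) && PySem.Chars.isIn sf.1 t)))).map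
    (fun p => (String.ofList p.1, p.2))

-- ===== PRECONDITION & SPEC =====
def Spec_find_sorted_substrings (string : String) (out : List (String × Int)) : Prop := out = find_sorted_substrings_alt string
instance (string : String) (out : List (String × Int)) : Decidable (Spec_find_sorted_substrings string out) := by unfold Spec_find_sorted_substrings; infer_instance

-- ===== CLAIM (what is proved, stated in full; the proofs are below) =====
def Claim_equal_find_sorted_substrings : Prop := ∀ (string : String), Dom_find_sorted_substrings string → Spec_find_sorted_substrings string (find_sorted_substrings string)

-- ===== LEMMAS AND PROOFS =====

-- ---------- proof-side spec: occurrence-list view ----------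

def keyC (cs : List Char) (d i : Nat) : Char := cs.getD (i + d) 'a'

def filtO (cs : List Char) (d : Nat) (O : List Nat) : List Nat :=
  O.filter (fun i => i + d < cs.length)

-- first occurrences, in order
def dedupF : List Char → List Char
  | [] => []
  | c :: r => c :: dedupF (r.filter (fun x => x ≠ c))
  termination_by l => l.length
  decreasing_by
    simp only [List.length_unattach, List.length_cons]
    exact Nat.lt_succ_of_le (le_trans (List.length_filter_le _ _) (by simp))

-- stable group-by (first-seen key order)
def groupBy' (key : Nat → Char) : List Nat → List (Char × List Nat)
  | [] => []
  | i :: r =>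
      (key i, i :: r.filter (fun j => key j = key i)) ::
        groupBy' key (r.filter (fun j => ¬ key j = key i))
  termination_by l => l.length
  decreasing_by
    simp only [List.length_unattach, List.length_cons]
    exact Nat.lt_succ_of_le (le_trans (List.length_filter_le _ _) (by simp))

def canonGroups (cs : List Char) (d : Nat) (O : List Nat) : List (Char × List Nat) :=
  groupBy' (keyC cs d) (filtO cs d O)

-- the trie of an occurrence list (fuel bounds the depth; ample fuel everywhere below)
def canonT (cs : List Char) : Nat → Nat → List Nat → CTrie
  | 0, _, _ => .nil
  | fuel + 1, d, O =>
      (canonGroups cs d O).foldr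
        (fun cg r => .cons cg.1 (cg.2.length : Int) (canonT cs fuel (d + 1) cg.2) r) .nil

-- appending a new position k at the END of a group list
def insGroupsEnd (k : Nat) (c : Char) : List (Char × List Nat) → List (Char × List Nat)
  | [] => [(c, [k])]
  | (c', G) :: r => if c' = c then (c', G ++ [k]) :: r else (c', G) :: insGroupsEnd k c r

theorem groupBy'_nil (key : Nat → Char) : groupBy' key [] = [] := by rw [groupBy']

theorem groupBy'_cons (key : Nat → Char) (i : Nat) (r : List Nat) :
    groupBy' key (i :: r) =
      (key i, i :: r.filter (fun j => key j = key i)) ::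
        groupBy' key (r.filter (fun j => ¬ key j = key i)) := by
  rw [groupBy']

theorem canonGroups_nil (cs : List Char) (d : Nat) : canonGroups cs d [] = [] := by
  simp [canonGroups, filtO, groupBy'_nil]

theorem canonT_nil (cs : List Char) (fuel d : Nat) : canonT cs fuel d [] = .nil := by
  cases fuel <;> simp [canonT, canonGroups_nil]

theorem filtO_append_single_lt (cs : List Char) (d k : Nat) (O : List Nat)
    (hkd : k + d < cs.length) : filtO cs d (O ++ [k]) = filtO cs d O ++ [k] := by
  simp [filtO, List.filter_append, hkd]

theorem filtO_append_single_ge (cs : List Char) (d k : Nat) (O : List Nat)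
    (hkd : ¬ k + d < cs.length) : filtO cs d (O ++ [k]) = filtO cs d O := by
  simp [filtO, List.filter_append, hkd]

theorem groupBy'_append_single (key : Nat → Char) (l : List Nat) (k : Nat) :
    groupBy' key (l ++ [k]) = insGroupsEnd k (key k) (groupBy' key l) := by
  fun_induction groupBy' key l with
  | case1 =>
      rw [List.nil_append, groupBy'_cons]
      simp [groupBy'_nil, insGroupsEnd]
  | case2 i r ih =>
      rw [List.unattach_filter (g := fun j => decide (¬ key j = key i)) (hf := fun a h => rfl),
        List.unattach_attach] at ih
      rw [List.cons_append, groupBy'_cons key i (r ++ [k]), insGroupsEnd]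
      by_cases hk : key k = key i
      · rw [if_pos hk.symm]
        simp only [List.filter_append, List.filter_cons, List.filter_nil]
        rw [if_pos (by simp [hk]), if_neg (by simp [hk])]
        simp
      · rw [if_neg (fun h => hk h.symm)]
        simp only [List.filter_append, List.filter_cons, List.filter_nil]
        rw [if_neg (by simp [hk]), if_pos (by simp [hk])]
        simp only [List.append_nil]
        rw [ih]

theorem canonGroups_append_lt (cs : List Char) (d k : Nat) (O : List Nat)
    (hkd : k + d < cs.length) :
    canonGroups cs d (O ++ [k]) = insGroupsEnd k (keyC cs d k) (canonGroups cs d O) := by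
  rw [canonGroups, filtO_append_single_lt cs d k O hkd, groupBy'_append_single, canonGroups]

theorem canonGroups_append_ge (cs : List Char) (d k : Nat) (O : List Nat)
    (hkd : ¬ k + d < cs.length) :
    canonGroups cs d (O ++ [k]) = canonGroups cs d O := by
  rw [canonGroups, filtO_append_single_ge cs d k O hkd, canonGroups]

theorem canonT_succ (cs : List Char) (fuel d : Nat) (O : List Nat) :
    canonT cs (fuel + 1) d O =
      (canonGroups cs d O).foldr
        (fun cg r => .cons cg.1 (cg.2.length : Int) (canonT cs fuel (d + 1) cg.2) r) .nil := rfl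

theorem canonGroups_single (cs : List Char) (d k : Nat) (hkd : k + d < cs.length) :
    canonGroups cs d [k] = [(keyC cs d k, [k])] := by
  have hf : filtO cs d [k] = [k] := by simp [filtO, hkd]
  rw [canonGroups, hf, groupBy'_cons]
  simp [groupBy'_nil]

theorem drop_keyC (cs : List Char) (d k : Nat) (hkd : k + d < cs.length) :
    cs.drop (k + d) = keyC cs d k :: cs.drop (k + d + 1) := by
  rw [List.drop_eq_getElem_cons hkd]
  congr 1
  rw [keyC, List.getD_eq_getElem cs 'a' hkd]

theorem fresh_path (cs : List Char) :
    ∀ fuel d k, cs.length + 1 ≤ fuel + d →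
      insertCL .nil (cs.drop (k + d)) = canonT cs fuel d [k] := by
  intro fuel
  induction fuel with
  | zero =>
      intro d k hf
      have : cs.drop (k + d) = [] := List.drop_eq_nil_of_le (by omega)
      rw [this, insertCL, canonT]
  | succ fuel ih =>
      intro d k hf
      by_cases hkd : k + d < cs.length
      · rw [drop_keyC cs d k hkd, insertCL, canonT_succ, canonGroups_single cs d k hkd]
        simp only [List.foldr_cons, List.foldr_nil, List.length_cons, List.length_nil]
        have := ih (d + 1) k (by omega)
        rw [show k + (d + 1) = k + d + 1 by omega] at this
        rw [this]
        norm_num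
      · have h1 : cs.drop (k + d) = [] := List.drop_eq_nil_of_le (by omega)
        have h2 : canonGroups cs d [k] = [] := by
          rw [canonGroups, show filtO cs d [k] = [] by simp [filtO, hkd], groupBy'_nil]
        rw [h1, insertCL, canonT_succ, h2, List.foldr_nil]

-- inserting the suffix starting at position k appends k to the trie's occurrence list
theorem insertCL_canonT (cs : List Char) :
    ∀ fuel d k O, cs.length + 1 ≤ fuel + d →
      insertCL (canonT cs fuel d O) (List.drop (k + d) cs) = canonT cs fuel d (O ++ [k]) := by
  intro fuel
  induction fuel with
  | zero =>
      intro d k O hf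
      have : cs.drop (k + d) = [] := List.drop_eq_nil_of_le (by omega)
      rw [this, canonT, canonT, insertCL]
  | succ fuel ih =>
      intro d k O hf
      by_cases hkd : k + d < cs.length
      · rw [canonT_succ, canonT_succ, canonGroups_append_lt cs d k O hkd, drop_keyC cs d k hkd]
        generalize canonGroups cs d O = gl
        induction gl with
        | nil =>
            rw [insGroupsEnd]
            simp only [List.foldr_nil, List.foldr_cons]
            rw [insertCL]
            simp only [List.length_cons, List.length_nil]
            have := fresh_path cs fuel (d + 1) k (by omega)
            rw [show k + (d + 1) = k + d + 1 by omega] at this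
            rw [this]
            norm_num
        | cons cg r ihg =>
            obtain ⟨c', G⟩ := cg
            rw [insGroupsEnd]
            simp only [List.foldr_cons]
            rw [insertCL]
            by_cases hc : c' = keyC cs d k
            · rw [if_pos hc, if_pos hc]
              simp only [List.foldr_cons, List.length_append, List.length_cons, List.length_nil]
              have := ih (d + 1) k G (by omega)
              rw [show k + (d + 1) = k + d + 1 by omega] at this
              rw [this]
              push_cast
              ring_nf
            · rw [if_neg hc, if_neg hc]
              rw [ihg]
              simp only [List.foldr_cons]
      · have h1 : cs.drop (k + d) = [] := List.drop_eq_nil_of_le (by omega)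
        rw [h1, insertCL, canonT_succ, canonT_succ, canonGroups_append_ge cs d k O hkd]

-- ---------- the stack walk ----------

theorem dfs_append (xs ys : List (Int × CTrie × List Char)) :
    dfsStack (xs ++ ys) = dfsStack xs ++ dfsStack ys := by
  revert ys
  induction xs using dfsStack.induct with
  | case1 => intro ys; simp [dfsStack]
  | case2 f ch p rest ih =>
      intro ys
      rw [List.cons_append]
      rw [dfsStack, dfsStack]
      rw [← List.append_assoc, ih, List.append_assoc]

theorem dfs_flat (xs : List (Int × CTrie × List Char)) :
    dfsStack xs = xs.flatMap (fun e => dfsStack [e]) := by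
  induction xs with
  | nil => simp [dfsStack]
  | cons e rest ih =>
      have : e :: rest = [e] ++ rest := rfl
      rw [this, dfs_append, ih]
      simp

theorem childEntries_foldr (gl : List (Char × List Nat)) (cs : List Char) (fuel d : Nat)
    (p : List Char) :
    childEntries
      (gl.foldr (fun cg r => .cons cg.1 (cg.2.length : Int) (canonT cs fuel (d + 1) cg.2) r) .nil) p
      = gl.map (fun cg => ((cg.2.length : Int), canonT cs fuel (d + 1) cg.2, p ++ [cg.1])) := by
  induction gl with
  | nil => simp [childEntries]
  | cons cg r ih => simp [childEntries, ih]

-- ---------- B's group dictionary is the stable group-by ----------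

theorem mem_dedupF (xs : List Char) (c : Char) (h : c ∈ dedupF xs) : c ∈ xs := by
  fun_induction dedupF xs with
  | case1 => simp at h
  | case2 x r ih =>
      rw [List.unattach_filter (g := fun x_1 => decide (x_1 ≠ x)) (hf := fun a h => rfl),
        List.unattach_attach] at ih
      rcases List.mem_cons.mp h with rfl | h2
      · exact List.mem_cons_self
      · exact List.mem_cons_of_mem _ (List.mem_filter.mp (ih h2) |>.1)


theorem foldl_add_dedup (xs : List Char) :
    ∀ s : PySem.Set Char, xs.foldl PySem.Set.add s
      = s ++ dedupF (xs.filter (fun x => !(s.contains x))) := by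
  induction xs with
  | nil => intro s; simp [dedupF]
  | cons x r ih =>
      intro s
      rw [List.foldl_cons, List.filter_cons]
      cases hx : s.contains x
      · have h1 : PySem.Set.add s x = s ++ [x] := by rw [PySem.Set.add, hx]; simp
        rw [h1, if_pos (show (!false) = true from rfl), ih, dedupF]
        simp only [List.append_assoc, List.singleton_append]
        congr 2
        rw [List.filter_filter]
        congr 1
        apply List.filter_congr
        intro a _
        simp only [PySem.Set.contains, List.contains_append, List.contains_cons,
          List.contains_nil]
        cases h1 : (List.contains s a) <;> cases h2 : (a == x) <;> simp_all
      · have h1 : PySem.Set.add s x = s := by rw [PySem.Set.add]; rw [if_pos hx]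
        rw [h1, if_neg (show ¬ (!true) = true from by simp), ih]

theorem ofList_eq_dedupF (xs : List Char) : PySem.Set.ofList xs = dedupF xs := by
  rw [PySem.Set.ofList, foldl_add_dedup]
  simp only [PySem.Set.empty]
  rw [show xs.filter (fun x => !(PySem.Set.contains ([] : List Char) x)) = xs from by
    apply List.filter_eq_self.mpr; intro a _; simp [PySem.Set.contains]]
  simp

theorem groupBy'_eq_dedup (key : Nat → Char) (l : List Nat) :
    groupBy' key l
      = (dedupF (l.map key)).map (fun c => (c, l.filter (fun i => key i = c))) := by
  fun_induction groupBy' key l with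
  | case1 => simp [dedupF]
  | case2 i r ih =>
      rw [List.unattach_filter (g := fun j => decide (¬ key j = key i)) (hf := fun a h => rfl),
        List.unattach_attach] at ih
      rw [List.map_cons, dedupF, List.map_cons]
      congr 1
      · simp
      · rw [ih]
        rw [show (List.map key r).filter (fun x => x ≠ key i)
              = (r.filter (fun j => ¬ key j = key i)).map key from by
            rw [List.filter_map]; rfl]
        apply List.map_congr_left
        intro c hc
        have hcm := mem_dedupF _ _ hc
        obtain ⟨j, hj, hjc⟩ := List.mem_map.mp hcm
        have hcne : ¬ key i = c := by
          have := List.of_mem_filter hj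
          simp only [decide_not, Bool.not_eq_eq_eq_not, Bool.not_true, decide_eq_false_iff_not] at this
          rw [← hjc]
          exact fun h => this h.symm
        congr 1
        rw [List.filter_cons, if_neg (by simpa using hcne), List.filter_filter]
        apply List.filter_congr
        intro a _
        by_cases h1 : key a = c
        · have h2 : ¬ key a = key i := fun h => hcne (h ▸ h1 ▸ rfl)
          simp [h1]
          exact fun h => hcne h.symm
        · simp [h1]

theorem bgroups_eq (cs : List Char) (d : Nat) (O : List Nat) :
    (O.foldl
      (fun (g : PySem.Dict Char (List Nat)) i =>
        if i + d < cs.length then g.modify (cs.getD (i + d) 'a') [] (fun v => v ++ [i]) else g)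
      PySem.Dict.empty).items
    = canonGroups cs d O := by
  rw [PySem.List.foldl_ite_eq_foldl_filter (p := fun i => i + d < cs.length)]
  rw [show List.filter (fun i => decide (i + d < cs.length)) O = filtO cs d O from rfl]
  have hkeys : (List.foldl (fun (g : PySem.Dict Char (List Nat)) i => g.modify (cs.getD (i + d) 'a') [] (fun v => v ++ [i])) PySem.Dict.empty (filtO cs d O)).keys = PySem.Set.ofList ((filtO cs d O).map (fun j => cs.getD (j + d) 'a')) := by
    rw [PySem.Dict.keys_foldl_modify_key]
    rfl
  have hnodup : (List.foldl (fun (g : PySem.Dict Char (List Nat)) i => g.modify (cs.getD (i + d) 'a') [] (fun v => v ++ [i])) PySem.Dict.empty (filtO cs d O)).keys.Nodup :=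
    PySem.Dict.nodup_keys_foldl_modify_key _ _ _ _ _ (by simp [PySem.Dict.empty, PySem.Dict.keys])
  have hgetD : ∀ c, (List.foldl (fun (g : PySem.Dict Char (List Nat)) i => g.modify (cs.getD (i + d) 'a') [] (fun v => v ++ [i])) PySem.Dict.empty (filtO cs d O)).getD c [] = (filtO cs d O).filter (fun i => keyC cs d i = c) := by
    intro c
    have h2 : (List.foldl (fun (g : PySem.Dict Char (List Nat)) i => g.modify (cs.getD (i + d) 'a') [] (fun v => v ++ [i])) PySem.Dict.empty (filtO cs d O)) = ((filtO cs d O).map (fun i => (cs.getD (i + d) 'a', i))).foldl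
        (fun g p => g.modify p.1 [] (fun v => v ++ [p.2])) PySem.Dict.empty := by
      rw [List.foldl_map]
    rw [h2, PySem.Dict.getD_foldl_modify_append]
    simp only [List.filter_map, List.map_map]
    have h3 : (List.filter ((fun (p : Char × Nat) => p.1 == c) ∘ fun i => (cs.getD (i + d) 'a', i)) (filtO cs d O))
        = (filtO cs d O).filter (fun i => keyC cs d i = c) := by
      apply List.filter_congr
      intro i _
      rw [Bool.eq_iff_iff]
      simp [Function.comp, keyC]
    rw [h3, show ((fun (x : Char × Nat) => x.2) ∘ fun i => (cs.getD (i + d) 'a', i)) = id from rfl,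
      List.map_id]
    simp [PySem.Dict.getD, PySem.Dict.get?, PySem.Dict.empty]
  rw [PySem.Dict.items_eq_map_keys _ hnodup []]
  rw [hkeys, ofList_eq_dedupF]
  rw [canonGroups, groupBy'_eq_dedup]
  rw [show (filtO cs d O).map (fun j => cs.getD (j + d) 'a') = (filtO cs d O).map (keyC cs d) from rfl]
  apply List.map_congr_left
  intro c _
  rw [hgetD c]

-- ---------- the walk equivalence ----------

theorem foldl_prepend (g : Char × List Nat → List (List Char × Int))
    (l : List (Char × List Nat)) (acc : List (List Char × Int)) :
    l.foldl (fun rest kv => g kv ++ rest) acc = l.reverse.flatMap g ++ acc := by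
  induction l generalizing acc with
  | nil => simp
  | cons a l ih =>
      rw [List.foldl_cons, ih, List.reverse_cons, List.flatMap_append]
      simp

theorem dfs_canon (cs : List Char) :
    ∀ fuel d O p f, p.length = d → cs.length + 1 ≤ fuel + d →
      (p ≠ [] → f = (O.length : Int)) →
      dfsStack [(f, canonT cs fuel d O, p)] = growB cs cs.length fuel p O := by
  intro fuel
  induction fuel with
  | zero =>
      intro d O p f hd hfl hf
      rw [canonT, dfsStack]
      simp only [childEntries, List.reverse_nil, List.append_nil]
      rw [dfsStack]
      rw [growB]
      have hp : p ≠ [] := by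
        intro h
        rw [h] at hd
        simp at hd
        omega
      rw [hf hp]
      by_cases h2 : 1 < O.length
      · rw [if_pos ⟨by simpa using List.length_pos_iff.mpr hp, by exact_mod_cast h2⟩,
          if_pos ⟨hp, h2⟩]
        simp
      · rw [if_neg, if_neg]
        · simp
        · rintro ⟨-, hc⟩; exact h2 hc
        · rintro ⟨-, hc⟩
          exact h2 (by exact_mod_cast hc)
  | succ fuel ih =>
      intro d O p f hd hfl hf
      subst hd
      rw [canonT_succ, dfsStack]
      simp only [List.append_nil]
      rw [childEntries_foldr]
      rw [growB]
      rw [bgroups_eq cs p.length O]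
      rw [foldl_prepend, List.append_nil]
      rw [dfs_flat]
      rw [← List.map_reverse, List.flatMap_map]
      congr 1
      · -- emits agree
        by_cases hp : p = []
        · subst hp; simp
        · rw [hf hp]
          have h1 : (0 < p.length ∧ (O.length : Int) ≥ 2) ↔ (p ≠ [] ∧ 1 < O.length) := by
            constructor
            · rintro ⟨a, b⟩
              exact ⟨by simpa using List.length_pos_iff.mp a, by exact_mod_cast b⟩
            · rintro ⟨a, b⟩; exact ⟨List.length_pos_iff.mpr a, by exact_mod_cast b⟩
          rw [if_congr h1 rfl rfl]
      · -- children agree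
        apply List.flatMap_congr
        intro cg _
        exact ih (p.length + 1) cg.2 (p ++ [cg.1]) ((cg.2.length : Int))
          (by simp) (by omega) (fun _ => rfl)

-- ---------- the build loop ----------

theorem pyRangeDown (n : Nat) :
    PySem.List.pyRange ((n : Int) - 1) (-1) (-1) = (List.range n).reverse.map Nat.cast := by
  rcases Nat.eq_zero_or_pos n with rfl | hn
  · simp [PySem.List.pyRange]
  · rw [PySem.List.pyRange, if_neg (by norm_num)]
    have h2 : (-1 : Int) < (n : Int) - 1 := by omega
    simp only [show ¬((0:Int) < -1) from by norm_num, if_false, if_pos h2]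
    have hc : (((n:Int) - 1 - -1 + - -1 - 1) / - -1).toNat = n := by
      norm_num
    rw [hc]
    apply List.ext_getElem
    · simp
    · intro j h1 h2'
      simp only [List.getElem_map, List.getElem_reverse, List.getElem_range, List.length_range]
      have hj : j < n := by simpa using h1
      omega

def descO (n m : Nat) : List Nat := (List.range' m (n - 1 - m)).reverse

theorem descO_append (n m : Nat) (h1 : m + 1 ≤ n - 1) :
    descO n m = descO n (m + 1) ++ [m] := by
  rw [descO, descO]
  rw [show n - 1 - m = (n - 1 - (m + 1)) + 1 by omega]
  rw [List.range'_succ, List.reverse_cons]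

theorem buildLoop (cs : List Char) :
    ∀ m, m ≤ cs.length →
      (((List.range m).reverse.map (Nat.cast : Nat → Int)).foldl
        (fun t i =>
          let suffix := PySem.List.slice cs (some i) none
          if suffix.length > 1 then insertCL t suffix else t)
        (canonT cs (cs.length + 1) 0 (descO cs.length m)))
      = canonT cs (cs.length + 1) 0 (descO cs.length 0) := by
  intro m
  induction m with
  | zero => intro _; simp
  | succ m ih =>
      intro hm
      have hslice : PySem.List.slice cs (some (m : Int)) none = cs.drop m := by
        rw [PySem.List.slice_from cs (Int.natCast_nonneg m)]
        simp
      rw [List.range_succ, List.reverse_append]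
      simp only [List.reverse_cons, List.reverse_nil, List.nil_append, List.map_cons,
        List.singleton_append, List.foldl_cons]
      have hstep :
          (let suffix := PySem.List.slice cs (some (m : Int)) none
           if suffix.length > 1 then
             insertCL (canonT cs (cs.length + 1) 0 (descO cs.length (m + 1))) suffix
           else canonT cs (cs.length + 1) 0 (descO cs.length (m + 1)))
          = canonT cs (cs.length + 1) 0 (descO cs.length m) := by
        simp only [hslice]
        by_cases hlen : (cs.drop m).length > 1
        · rw [if_pos hlen]
          have h2 := insertCL_canonT cs (cs.length + 1) 0 m (descO cs.length (m + 1)) (by omega)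
          simp only [Nat.add_zero] at h2
          rw [h2, ← descO_append cs.length m (by simp [List.length_drop] at hlen; omega)]
        · rw [if_neg hlen]
          congr 1
          have hl : cs.length - m ≤ 1 := by simp [List.length_drop] at hlen; omega
          simp [descO, show cs.length - 1 - m = 0 by omega,
            show cs.length - 1 - (m + 1) = 0 by omega]
      rw [hstep]
      exact ih (by omega)

-- ---------- the containment filter ----------

theorem byFreq_getD (L : List (List Char × Int)) (f : Int) :
    (L.foldl
      (fun (d : PySem.Dict Int (List (List Char))) sf => d.modify sf.2 [] (fun v => v ++ [sf.1]))
      PySem.Dict.empty).getD f []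
    = (L.filter (fun og => og.2 = f)).map (fun og => og.1) := by
  have h2 : L.foldl (fun (d : PySem.Dict Int (List (List Char))) sf => d.modify sf.2 [] (fun v => v ++ [sf.1])) PySem.Dict.empty
      = (L.map (fun sf => (sf.2, sf.1))).foldl (fun d p => d.modify p.1 [] (fun v => v ++ [p.2])) PySem.Dict.empty := by
    rw [List.foldl_map]
  rw [h2, PySem.Dict.getD_foldl_modify_append]
  simp only [List.filter_map, List.map_map]
  simp [PySem.Dict.getD, PySem.Dict.get?, PySem.Dict.empty]
  have h3 : (List.filter ((fun (p : Int × List Char) => p.1 == f) ∘ fun sf => (sf.2, sf.1)) L)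
      = List.filter (fun og => decide (og.2 = f)) L := by
    apply List.filter_congr
    intro og _
    rw [Bool.eq_iff_iff]
    simp [Function.comp]
  rw [h3]
  simp [Function.comp]

theorem any_swap (L : List (List Char × Int)) (sf : List Char × Int) :
    (L.any (fun og =>
        decide (sf.1 ≠ og.1) && PySem.Chars.isIn sf.1 og.1 && decide (sf.2 = og.2)))
    = ((L.filter (fun og => og.2 = sf.2)).map (fun og => og.1)).any
        (fun t => decide (sf.1 ≠ t) && PySem.Chars.isIn sf.1 t) := by
  rw [List.any_map]
  rw [Bool.eq_iff_iff]
  simp only [List.any_eq_true, List.mem_filter, Function.comp]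
  constructor
  · rintro ⟨og, hog, h⟩
    refine ⟨og, ⟨hog, ?_⟩, ?_⟩
    · simp at h ⊢
      omega
    · simp at h ⊢
      tauto
  · rintro ⟨og, ⟨hog, hf⟩, h⟩
    refine ⟨og, hog, ?_⟩
    simp at h hf ⊢
    tauto

theorem filter_equiv (L : List (List Char × Int)) :
    L.foldl
      (fun acc sf =>
        if L.any (fun og =>
            decide (sf.1 ≠ og.1) && PySem.Chars.isIn sf.1 og.1 && decide (sf.2 = og.2)) then acc
        else acc ++ [sf]) []
    = L.filter (fun sf =>
        !(((L.foldl
            (fun (d : PySem.Dict Int (List (List Char))) sf =>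
              d.modify sf.2 [] (fun v => v ++ [sf.1]))
            PySem.Dict.empty).getD sf.2 []).any
          (fun t => decide (sf.1 ≠ t) && PySem.Chars.isIn sf.1 t))) := by
  have h1 : (fun (acc : List (List Char × Int)) sf =>
        if L.any (fun og =>
            decide (sf.1 ≠ og.1) && PySem.Chars.isIn sf.1 og.1 && decide (sf.2 = og.2)) then acc
        else acc ++ [sf])
      = (fun acc sf =>
        if (!(L.any (fun og =>
            decide (sf.1 ≠ og.1) && PySem.Chars.isIn sf.1 og.1 && decide (sf.2 = og.2)))) = true
        then acc ++ [id sf] else acc) := by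
    funext acc sf
    cases h : L.any (fun og =>
        decide (sf.1 ≠ og.1) && PySem.Chars.isIn sf.1 og.1 && decide (sf.2 = og.2)) <;> simp [h]
  rw [h1, PySem.List.foldl_append_if]
  simp only [List.nil_append, List.map_id]
  apply List.filter_congr
  intro sf _
  rw [byFreq_getD L sf.2, any_swap L sf]

-- ---------- assembly ----------

theorem find_sorted_substrings_main (string : String) :
    find_sorted_substrings string = find_sorted_substrings_alt string := by
  rw [find_sorted_substrings, find_sorted_substrings_alt]
  dsimp only
  have hroot : ((PySem.List.pyRange ((string.toList.length : Int) - 1) (-1) (-1)).foldl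
      (fun t i =>
        let suffix := PySem.List.slice string.toList (some i) none
        if suffix.length > 1 then insertCL t suffix else t) .nil)
      = canonT string.toList (string.toList.length + 1) 0 (descO string.toList.length 0) := by
    rw [pyRangeDown]
    have h0 : (CTrie.nil)
        = canonT string.toList (string.toList.length + 1) 0
            (descO string.toList.length string.toList.length) := by
      rw [show descO string.toList.length string.toList.length = [] from by simp [descO],
        canonT_nil]
    rw [h0]
    exact buildLoop string.toList string.toList.length (le_refl _)
  rw [hroot]
  rw [dfs_canon string.toList (string.toList.length + 1) 0 (descO string.toList.length 0) [] 0
    rfl (by omega) (fun h => absurd rfl h)]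
  rw [show descO string.toList.length 0 = (List.range (string.toList.length - 1)).reverse from by
    simp [descO, List.range_eq_range']]
  rw [filter_equiv]

-- ===== VERDICT (by name: the statement is the Claim_ definition above) =====
theorem find_sorted_substrings_spec : Claim_equal_find_sorted_substrings := by
  intro s _
  unfold Spec_find_sorted_substrings
  exact find_sorted_substrings_main s
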